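-- pv_equiv track=rewrite | github.com/Petlya2000/Test_python_tasks | python1/task1.py | circular_path
-- ===== SOURCE A (Python) =====
-- def circular_path(n, m):
--     """
--     Вычисляет путь для кругового массива длины n с интервалом m.
--     """
--     path = []
--     current_index = 0  # Начинаем с первого элемента (индекс 0)
--
--     while True:
--         # Добавляем текущий элемент в путь
--         path.append(current_index + 1)  # Индексы начинаются с 0, поэтому +1
--
--         # Вычисляем следующий индекс
--         current_index = (current_index + m) % n
--
--         # Если вернулись к началу, завершаем цикл
--         if current_index == 0:
--             break
--
--     return path
-- ===== SOURCE B (Python) =====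
-- def circular_path(n, m):
--     """
--     Вычисляет путь для кругового массива длины n с интервалом m.
--     """
--     # cycle length g = |n| / gcd(|n|, |m|); the visited index after i steps is (i*m) % n
--     a, b = abs(n), abs(m)
--     while b:
--         a, b = b, a % b
--     g = abs(n) // a
--     return [(i * m) % n + 1 for i in range(g)]
-- ===== Notes on version B (the rewrite author's own statement) =====
-- stated objective: alternative
-- what changed: Replaces A's step-and-test while-loop (walk by m mod n until back to 0) with a closed-form construction: compute the cycle length g = |n| // gcd(|n|,|m|) via Euclid's algorithm and emit [(i*m) % n + 1 for i in range(g)] positionally; both are output-bound, so same cost.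
import Mathlib
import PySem

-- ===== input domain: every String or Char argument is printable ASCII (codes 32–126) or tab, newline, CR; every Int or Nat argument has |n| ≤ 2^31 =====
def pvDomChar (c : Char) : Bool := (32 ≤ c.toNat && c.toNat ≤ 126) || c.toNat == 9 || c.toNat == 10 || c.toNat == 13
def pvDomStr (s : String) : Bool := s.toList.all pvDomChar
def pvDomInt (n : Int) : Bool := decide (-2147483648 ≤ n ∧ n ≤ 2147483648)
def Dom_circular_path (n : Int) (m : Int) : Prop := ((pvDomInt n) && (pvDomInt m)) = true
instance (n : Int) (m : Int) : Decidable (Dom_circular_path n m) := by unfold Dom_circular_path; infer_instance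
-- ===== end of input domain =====

-- B replaces A's step-until-back-to-start while-loop by a computed cycle length
-- |n| / gcd(|n|,|m|) (hand-rolled Euclid, A imports nothing) plus positional arithmetic (i*m) % n.

-- ===== PORT A =====
-- while True: append cur+1; cur = (cur+m) % n; break when cur == 0.
-- Fuel n.natAbs: inside Pre_ the loop returns to 0 after |n|/gcd(|n|,|m|) ≤ |n| iterations
-- (proved below), so the fuel is never exhausted on admitted inputs.
def circular_path_loop (n m : Int) : Nat → Int → List Int
  | 0, cur => [cur + 1]
  | f + 1, cur =>
    let nxt := PySem.Int.mod (cur + m) n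
    if nxt = 0 then [cur + 1] else (cur + 1) :: circular_path_loop n m f nxt

def circular_path (n : Int) (m : Int) : List Int :=
  circular_path_loop n m n.natAbs 0

-- ===== PORT B =====
-- while b: a, b = b, a % b   (Euclid's loop, transliterated)
def euclid_loop (a b : Int) : Int :=
  if h : b = 0 then a else euclid_loop b (PySem.Int.mod a b)
termination_by b.natAbs
decreasing_by
  rcases lt_or_gt_of_ne h with hb | hb
  · have := PySem.Int.mod_neg_bounds a hb
    omega
  · have h0 := PySem.Int.mod_nonneg a hb
    have h1 := PySem.Int.mod_lt a hb
    omega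

def circular_path_alt (n : Int) (m : Int) : List Int :=
  (PySem.List.pyRange 0
      (PySem.Int.floordiv (n.natAbs : Int) (euclid_loop (n.natAbs : Int) (m.natAbs : Int))) 1).map
    (fun i => PySem.Int.mod (i * m) n + 1)

-- ===== PRECONDITION & SPEC =====
-- A raises ZeroDivisionError exactly when n = 0 (the very first '% n').
def Pre_circular_path (n : Int) (m : Int) : Prop := n ≠ 0
instance (n : Int) (m : Int) : Decidable (Pre_circular_path n m) := by unfold Pre_circular_path; infer_instance

def pvWitness_circular_path : Int × Int := (5, 2)

def Spec_circular_path (n : Int) (m : Int) (out : List Int) : Prop := out = circular_path_alt n m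
instance (n : Int) (m : Int) (out : List Int) : Decidable (Spec_circular_path n m out) := by unfold Spec_circular_path; infer_instance

-- ===== CLAIM (what is proved, stated in full; the proofs are below) =====
def Claim_equal_circular_path : Prop := ∀ (n : Int) (m : Int), Dom_circular_path n m → Pre_circular_path n m → Spec_circular_path n m (circular_path n m)
-- ===== LEMMAS AND PROOFS =====

theorem gcd_emod (a b : Int) : Int.gcd b (a % b) = Int.gcd a b := by
  rw [Int.emod_def, show a - b*(a/b) = a + (-(a/b)) * b by ring,
      Int.gcd_add_mul_right_right, Int.gcd_comm]

-- Euclid's loop computes the gcd (for nonnegative arguments).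
theorem euclid_loop_eq_gcd (a b : Int) (ha : 0 ≤ a) (hb : 0 ≤ b) :
    euclid_loop a b = (Int.gcd a b : Int) := by
  by_cases h : b = 0
  · subst h
    rw [euclid_loop]
    simp [Int.gcd, Int.natAbs_of_nonneg ha]
  · have hbpos : 0 < b := lt_of_le_of_ne hb (Ne.symm h)
    rw [euclid_loop]
    simp only [h, dite_false]
    rw [euclid_loop_eq_gcd b (PySem.Int.mod a b) hb (PySem.Int.mod_nonneg a hbpos)]
    rw [PySem.Int.mod_eq_emod_of_pos hbpos, gcd_emod]
termination_by b.natAbs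
decreasing_by
  have h0 := PySem.Int.mod_nonneg a hbpos
  have h1 := PySem.Int.mod_lt a hbpos
  omega

-- mod respects adding a residue: (a % n + m) % n = (a + m) % n
theorem mod_add_mod (n m a : Int) :
    PySem.Int.mod (PySem.Int.mod a n + m) n = PySem.Int.mod (a + m) n := by
  simp only [PySem.Int.mod]
  rw [Int.add_fmod, Int.fmod_fmod_of_dvd a (dvd_refl n), ← Int.add_fmod]

theorem aux_cancel (d N' M' k : Nat) (hd : 0 < d) (hcop : N'.Coprime M') :
    d * N' ∣ k * (d * M') ↔ N' ∣ k := by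
  constructor
  · intro h
    apply Nat.Coprime.dvd_of_dvd_mul_right hcop
    apply (Nat.mul_dvd_mul_iff_left hd).mp
    rw [show d * (k * M') = k * (d * M') by ring]
    exact h
  · rintro ⟨c, rfl⟩
    exact ⟨c * M', by ring⟩

theorem nat_dvd_div_gcd (N M k : Nat) (hN : N ≠ 0) :
    N ∣ k * M ↔ N / Nat.gcd N M ∣ k := by
  have hd : 0 < Nat.gcd N M := Nat.gcd_pos_of_pos_left M (Nat.pos_of_ne_zero hN)
  have hcop := Nat.coprime_div_gcd_div_gcd (m := N) (n := M) hd
  have hNd : N = Nat.gcd N M * (N / Nat.gcd N M) := (Nat.mul_div_cancel' (Nat.gcd_dvd_left N M)).symm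
  have hMd : M = Nat.gcd N M * (M / Nat.gcd N M) := (Nat.mul_div_cancel' (Nat.gcd_dvd_right N M)).symm
  calc N ∣ k * M ↔ Nat.gcd N M * (N / Nat.gcd N M) ∣ k * (Nat.gcd N M * (M / Nat.gcd N M)) := by
        rw [← hNd, ← hMd]
    _ ↔ N / Nat.gcd N M ∣ k := aux_cancel _ _ _ _ hd hcop

-- divisibility characterisation: (k*m) % n = 0 ↔ g ∣ k where g = |n| / gcd(n,m)
theorem mod_mul_eq_zero_iff (n m : Int) (hn : n ≠ 0) (k : Nat) :
    PySem.Int.mod ((k : Int) * m) n = 0 ↔ (n.natAbs / Int.gcd n m) ∣ k := by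
  rw [PySem.Int.mod_eq_zero_iff_dvd, ← Int.natAbs_dvd, Int.natCast_dvd, Int.natAbs_mul]
  show n.natAbs ∣ (k:Int).natAbs * m.natAbs ↔ _
  rw [Int.natAbs_natCast, nat_dvd_div_gcd _ _ _ (Int.natAbs_ne_zero.mpr hn)]
  rfl

-- A's loop, started at step i, lists the residues of steps i, i+1, …, g-1
theorem loop_eq_map (n m : Int) (hn : n ≠ 0) :
    ∀ (f i : Nat), i < n.natAbs / Int.gcd n m → n.natAbs / Int.gcd n m - i ≤ f + 1 →
      circular_path_loop n m f (PySem.Int.mod ((i : Int) * m) n) =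
        (List.range' i (n.natAbs / Int.gcd n m - i)).map
          (fun (j : Nat) => PySem.Int.mod ((j : Int) * m) n + 1) := by
  intro f
  induction f with
  | zero =>
    intro i hi hf
    have h1 : n.natAbs / Int.gcd n m - i = 1 := by omega
    rw [h1]
    simp [circular_path_loop]
  | succ f ih =>
    intro i hi hf
    rw [circular_path_loop]
    have hnxt : PySem.Int.mod (PySem.Int.mod ((i : Int) * m) n + m) n
        = PySem.Int.mod (((i + 1 : Nat) : Int) * m) n := by
      rw [mod_add_mod]
      congr 1
      push_cast
      ring
    by_cases hg : i + 1 = n.natAbs / Int.gcd n m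
    · have hz : PySem.Int.mod (((i + 1 : Nat) : Int) * m) n = 0 := by
        rw [mod_mul_eq_zero_iff n m hn]
        rw [hg]
      have h1 : n.natAbs / Int.gcd n m - i = 1 := by omega
      simp only [hnxt, hz, h1]
      simp
    · have hlt : i + 1 < n.natAbs / Int.gcd n m := by omega
      have hnz : PySem.Int.mod (((i + 1 : Nat) : Int) * m) n ≠ 0 := by
        intro heq
        have hdvd := (mod_mul_eq_zero_iff n m hn (i + 1)).mp heq
        have := Nat.le_of_dvd (by omega) hdvd
        omega
      simp only [hnxt, if_neg hnz]
      rw [ih (i + 1) hlt (by omega)]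
      have hsplit : n.natAbs / Int.gcd n m - i = (n.natAbs / Int.gcd n m - (i + 1)) + 1 := by omega
      rw [hsplit, List.range'_succ]
      simp

-- ===== VERDICT (by name: the statement is the Claim_ definition above) =====
theorem circular_path_spec : Claim_equal_circular_path := by
  intro n m _ hn
  unfold Spec_circular_path
  have hN : n.natAbs ≠ 0 := Int.natAbs_ne_zero.mpr hn
  have hd : 0 < Int.gcd n m := Nat.gcd_pos_of_pos_left _ (Nat.pos_of_ne_zero hN)
  have hdle : Int.gcd n m ≤ n.natAbs := Nat.le_of_dvd (Nat.pos_of_ne_zero hN) (Nat.gcd_dvd_left _ _)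
  have hg : 0 < n.natAbs / Int.gcd n m := Nat.div_pos hdle hd
  have hL : circular_path n m =
      (List.range' 0 (n.natAbs / Int.gcd n m)).map
        (fun (j : Nat) => PySem.Int.mod ((j : Int) * m) n + 1) := by
    have h := loop_eq_map n m hn n.natAbs 0 hg
      (by have := Nat.div_le_self n.natAbs (Int.gcd n m); omega)
    rw [show PySem.Int.mod (((0 : Nat) : Int) * m) n = 0 by simp [PySem.Int.mod]] at h
    simpa [circular_path] using h
  have hgcd : Int.gcd ((n.natAbs : Int)) ((m.natAbs : Int)) = Int.gcd n m := by
    unfold Int.gcd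
    rw [Int.natAbs_natCast, Int.natAbs_natCast]
  have hR : circular_path_alt n m =
      (List.range (n.natAbs / Int.gcd n m)).map
        (fun (j : Nat) => PySem.Int.mod ((j : Int) * m) n + 1) := by
    unfold circular_path_alt
    rw [euclid_loop_eq_gcd _ _ (Int.natCast_nonneg _) (Int.natCast_nonneg _), hgcd,
        PySem.Int.floordiv_natCast, PySem.List.pyRange_zero_natCast, List.map_map]
    rfl
  rw [hL, hR, List.range_eq_range']
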